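-- pv_equiv track=rewrite | github.com/attatrol/meme_telegram_bot | memeprovider.py | split_text_ex
-- ===== SOURCE A (Python) =====
-- def split_text_ex(lengths, line_count, max_line_count, min_line_count):
--     '''
--     Рекурсивная процедура для split_text
--     '''
--     assert line_count > 0
--     results = []
--     if len(lengths) == 0:
--         return None
--     if line_count == 1:
--         length_sum = len(lengths) - 1
--         for length in lengths:
--             length_sum += length[1]
--         if length_sum > max_line_count:
--             max_line_count = length_sum
--         if length_sum < min_line_count:
--             min_line_count = length_sum
--         return ([lengths], (max_line_count, min_line_count))
--     for i in range(1, len(lengths) - line_count + 2):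
--         first_line_len = i - 1 # пробелы
--         for j in range(i):
--             first_line_len +=lengths[j][1]
--         other_words = lengths[i : ]
--         result = split_text_ex(other_words, line_count - 1, max_line_count, min_line_count)
--         if result is None:
--             continue
--         first_line_words = lengths[ : i]
--         if result[1][0] < first_line_len:
--             result = (result[0], (first_line_len, result[1][1]))
--         if result[1][1] > first_line_len:
--             result = (result[0], (result[1][0], first_line_len))
--         result[0].insert(0, first_line_words)
--         results.append(result)
--     if len(results) == 0:
--         return None
--     best_index = -1
--     best_max_length = float("inf")
--     best_min_length = 0
--     for i in range(0, len(results)):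
--         if results[i] is not None:
--             max_length = results[i][1][0]
--             min_length = results[i][1][1]
--         if  max_length < best_max_length or (max_length == best_max_length and min_length > best_min_length):
--             best_max_length = max_length
--             best_min_length = min_length
--             best_index = i
--     return None if best_index == -1 else results[best_index]
-- ===== SOURCE B (Python) =====
-- def split_text_ex(lengths, line_count, max_line_count, min_line_count):
--     # Bottom-up DP over (start index, number of lines) with prefix sums,
--     # instead of A's exponential recursive enumeration of compositions.
--     assert line_count > 0
--     n = len(lengths)
--     if n == 0 or line_count > n:
--         return None
--     pref = [0]
--     for p in lengths:
--         pref.append(pref[-1] + p[1])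
--     def seg(j, i):
--         # length of the line made of words j..i-1 (with i-j-1 separating spaces)
--         return pref[i] - pref[j] + (i - j) - 1
--     # rows[k-1][j] = (max_len, min_len, first split point) of the best split of
--     # the suffix starting at j into k lines, or None if impossible
--     row = [(max(max_line_count, seg(j, n)), min(min_line_count, seg(j, n)), n)
--            if j < n else None for j in range(n + 1)]
--     rows = [row]
--     for k in range(2, line_count + 1):
--         prev = row
--         row = []
--         for j in range(n + 1):
--             best = None
--             for i in range(j + 1, n - k + 2):
--                 sub = prev[i]
--                 if sub is None:
--                     continue
--                 fl = seg(j, i)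
--                 M = max(sub[0], fl)
--                 m = min(sub[1], fl)
--                 if best is None or M < best[0] or (M == best[0] and m > best[1]):
--                     best = (M, m, i)
--             row.append(best)
--         rows.append(row)
--     if row[0] is None:
--         return None
--     M, m, _ = row[0]
--     parts = []
--     j = 0
--     for k in range(line_count, 0, -1):
--         c = rows[k - 1][j][2]
--         parts.append(lengths[j:c])
--         j = c
--     return (parts, (M, m))
-- ===== Notes on version B (the rewrite author's own statement) =====
-- stated objective: faster
-- what changed: Replaced A's exponential recursive enumeration of first-line sizes (re-solving each suffix repeatedly and re-summing word lengths per candidate) by a bottom-up dynamic program over (start index, line count) with prefix sums, storing (max,min,split) per state and reconstructing the partition from the stored split points.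
import Mathlib
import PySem

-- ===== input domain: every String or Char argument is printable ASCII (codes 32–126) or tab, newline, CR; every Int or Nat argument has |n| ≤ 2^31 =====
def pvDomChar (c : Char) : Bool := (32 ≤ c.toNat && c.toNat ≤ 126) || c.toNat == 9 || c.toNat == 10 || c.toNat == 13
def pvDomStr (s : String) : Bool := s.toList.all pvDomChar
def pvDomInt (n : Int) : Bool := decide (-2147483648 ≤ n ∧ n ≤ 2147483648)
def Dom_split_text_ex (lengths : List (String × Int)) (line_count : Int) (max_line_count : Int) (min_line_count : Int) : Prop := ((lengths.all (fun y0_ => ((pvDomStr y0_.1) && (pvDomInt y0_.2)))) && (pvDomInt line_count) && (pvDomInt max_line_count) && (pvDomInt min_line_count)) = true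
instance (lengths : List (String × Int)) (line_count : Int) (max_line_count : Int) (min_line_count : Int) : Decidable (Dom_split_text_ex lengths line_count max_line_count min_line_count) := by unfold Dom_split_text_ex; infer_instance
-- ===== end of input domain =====

-- B replaces A's exponential recursive enumeration of first-line sizes by a bottom-up
-- dynamic program over (start index, line count) with prefix sums (objective: faster).

-- ===== PORT A =====

-- A's trailing selection block (the best_index / best_max_length / best_min_length loop);
-- float("inf") is modelled as `none`.  The final `results[best_index]` is wrapped in the
-- function's Optional return type, so `pyGet?` (in range there) is exactly that value.
def selStepA (st : Int × Option Int × Int)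
    (ir : Int × ((List (List (String × Int))) × (Int × Int))) : Int × Option Int × Int :=
  if (st.2.1.elim true (fun b => decide (ir.2.2.1 < b))) ||
     ((st.2.1.elim false (fun b => ir.2.2.1 == b)) && decide (ir.2.2.2 > st.2.2)) then
    (ir.1, some ir.2.2.1, ir.2.2.2)
  else st

def pickBestA (results : List ((List (List (String × Int))) × (Int × Int))) :
    Option ((List (List (String × Int))) × (Int × Int)) :=
  if results.length = 0 then none
  else
    let sel := (PySem.List.enumerate results 0).foldl selStepA (-1, none, 0)
    if sel.1 == -1 then none else PySem.List.pyGet? results sel.1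

-- the recursion of A, on line_count as a Nat (the wrapper below supplies line_count.toNat)
def splitA_rec : Nat → List (String × Int) → Int → Int →
    Option ((List (List (String × Int))) × (Int × Int))
  | 0, _, _, _ => none   -- unreachable under `assert line_count > 0`; totality guard
  | 1, lengths, max_line_count, min_line_count =>
    if lengths.length = 0 then none
    else
      let length_sum := lengths.foldl (fun acc p => acc + p.2) ((lengths.length : Int) - 1)
      let max_line_count := if length_sum > max_line_count then length_sum else max_line_count
      let min_line_count := if length_sum < min_line_count then length_sum else min_line_count
      some ([lengths], (max_line_count, min_line_count))
  | (t+2), lengths, max_line_count, min_line_count =>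
    if lengths.length = 0 then none
    else
      let results :=
        (PySem.List.pyRange 1 ((lengths.length : Int) - ((t : Int) + 2) + 2)).foldl
          (fun results i =>
            -- first_line_len = i - 1 spaces plus the word lengths lengths[j][1], j < i
            let first_line_len :=
              (PySem.List.pyRange 0 i).foldl
                (fun s j => s + (PySem.List.pyGetD lengths j ("", 0)).2) (i - 1)
                -- pyGetD: lengths[j] never raises here (0 ≤ j < i ≤ len(lengths))
            let other_words := PySem.List.slice lengths (some i) none
            match splitA_rec (t+1) other_words max_line_count min_line_count with
            | none => results
            | some result =>
              let first_line_words := PySem.List.slice lengths none (some i)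
              let result := if result.2.1 < first_line_len then (result.1, (first_line_len, result.2.2)) else result
              let result := if result.2.2 > first_line_len then (result.1, (result.2.1, first_line_len)) else result
              results ++ [(first_line_words :: result.1, result.2)])
          []
      pickBestA results

def split_text_ex (lengths : List (String × Int)) (line_count : Int) (max_line_count : Int) (min_line_count : Int) : Option ((List (List (String × Int))) × (Int × Int)) :=
  if line_count ≤ 0 then none   -- `assert line_count > 0` raises: outside Pre_
  else splitA_rec line_count.toNat lengths max_line_count min_line_count

-- ===== PORT B =====

-- prefix sums: pref = [0]; for p in lengths: pref.append(pref[-1] + p[1])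
def prefB (lengths : List (String × Int)) : List Int :=
  lengths.foldl (fun pref p => pref ++ [PySem.List.pyGetD pref (-1) 0 + p.2]) [0]

-- length of the line made of words j..i-1 (with i-j-1 separating spaces)
def segB (pref : List Int) (j i : Nat) : Int :=
  pref.getD i 0 - pref.getD j 0 + ((i : Int) - (j : Int)) - 1

-- dp row for one line: best (max, min, split point) of the suffix starting at j
def row1B (lengths : List (String × Int)) (pref : List Int) (mx mn : Int) :
    List (Option (Int × Int × Nat)) :=
  (List.range (lengths.length + 1)).map fun j =>
    if j < lengths.length then
      some (max mx (segB pref j lengths.length), min mn (segB pref j lengths.length), lengths.length)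
    else none

-- body of the inner loop of the dp step (one candidate split point i)
def pickB (pref : List Int) (prev : List (Option (Int × Int × Nat))) (j : Nat)
    (best : Option (Int × Int × Nat)) (i : Nat) : Option (Int × Int × Nat) :=
  match prev.getD i none with
  | none => best
  | some sub =>
    let fl := segB pref j i
    let M := max sub.1 fl
    let m := min sub.2.1 fl
    match best with
    | none => some (M, m, i)
    | some b => if M < b.1 ∨ (M = b.1 ∧ m > b.2.1) then some (M, m, i) else best

-- dp row for k lines from the row for k-1 lines
def stepB (lengths : List (String × Int)) (pref : List Int)
    (prev : List (Option (Int × Int × Nat))) (k : Nat) : List (Option (Int × Int × Nat)) :=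
  (List.range (lengths.length + 1)).map fun j =>
    (List.range' (j+1) ((lengths.length + 2 - k) - (j+1))).foldl (pickB pref prev j) none

-- rows[k-1] = dp row for k lines
def rowsB (lengths : List (String × Int)) (pref : List Int) (mx mn : Int) :
    Nat → List (List (Option (Int × Int × Nat)))
  | 0 => []
  | 1 => [row1B lengths pref mx mn]
  | (t+2) =>
    let rows := rowsB lengths pref mx mn (t+1)
    rows ++ [stepB lengths pref (rows.getLastD []) (t+2)]

-- walk the stored split points, slicing out the lines front to back
def rebuildB (lengths : List (String × Int)) (rows : List (List (Option (Int × Int × Nat)))) :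
    Nat → Nat → List (List (String × Int))
  | 0, _ => []
  | (t+1), j =>
    match (rows.getD t []).getD j none with
    | none => []   -- unreachable: the entry exists whenever the reconstruction reaches it
    | some e => PySem.List.slice lengths (some (j : Int)) (some (e.2.2 : Int)) ::
        rebuildB lengths rows t e.2.2

def split_text_ex_alt (lengths : List (String × Int)) (line_count : Int) (max_line_count : Int) (min_line_count : Int) : Option ((List (List (String × Int))) × (Int × Int)) :=
  if line_count ≤ 0 then none   -- `assert line_count > 0` raises: outside Pre_
  else if lengths.length = 0 ∨ (lengths.length : Int) < line_count then none
  else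
    let pref := prefB lengths
    let rows := rowsB lengths pref max_line_count min_line_count line_count.toNat
    match (rows.getLastD []).getD 0 none with
    | none => none
    | some e => some (rebuildB lengths rows line_count.toNat 0, (e.1, e.2.1))

-- ===== PRECONDITION & SPEC =====
-- Pre_ excludes exactly the inputs on which A's `assert line_count > 0` raises AssertionError.
def Pre_split_text_ex (lengths : List (String × Int)) (line_count : Int) (max_line_count : Int) (min_line_count : Int) : Prop :=
  0 < line_count
instance (lengths : List (String × Int)) (line_count : Int) (max_line_count : Int) (min_line_count : Int) : Decidable (Pre_split_text_ex lengths line_count max_line_count min_line_count) := by unfold Pre_split_text_ex; infer_instance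

def pvWitness_split_text_ex : (List (String × Int)) × Int × Int × Int :=
  ([("ab", 2), ("c", 1), ("def", 3)], 2, 0, 0)

def Spec_split_text_ex (lengths : List (String × Int)) (line_count : Int) (max_line_count : Int) (min_line_count : Int) (out : Option ((List (List (String × Int))) × (Int × Int))) : Prop := out = split_text_ex_alt lengths line_count max_line_count min_line_count
instance (lengths : List (String × Int)) (line_count : Int) (max_line_count : Int) (min_line_count : Int) (out : Option ((List (List (String × Int))) × (Int × Int))) : Decidable (Spec_split_text_ex lengths line_count max_line_count min_line_count out) := by unfold Spec_split_text_ex; infer_instance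

-- ===== CLAIM (what is proved, stated in full; the proofs are below) =====
def Claim_equal_split_text_ex : Prop := ∀ (lengths : List (String × Int)) (line_count : Int) (max_line_count : Int) (min_line_count : Int), Dom_split_text_ex lengths line_count max_line_count min_line_count → Pre_split_text_ex lengths line_count max_line_count min_line_count → Spec_split_text_ex lengths line_count max_line_count min_line_count (split_text_ex lengths line_count max_line_count min_line_count)

-- ===== LEMMAS AND PROOFS =====

-- proof-side mirror of the dp recursion (rowVal k = dp row for k lines)
def rowVal (lengths : List (String × Int)) (pref : List Int) (mx mn : Int) :
    Nat → List (Option (Int × Int × Nat))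
  | 0 => []
  | 1 => row1B lengths pref mx mn
  | (t+2) => stepB lengths pref (rowVal lengths pref mx mn (t+1)) (t+2)

-- proof-side mirror of the reconstruction, reading rowVal instead of the rows list
def rebuildV (lengths : List (String × Int)) (pref : List Int) (mx mn : Int) :
    Nat → Nat → List (List (String × Int))
  | 0, _ => []
  | (t+1), j =>
    match (rowVal lengths pref mx mn (t+1)).getD j none with
    | none => []
    | some e => PySem.List.slice lengths (some (j : Int)) (some (e.2.2 : Int)) ::
        rebuildV lengths pref mx mn t e.2.2

-- A's selection rule as a left fold keeping the better element (first wins ties)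
def obA (b : Option ((List (List (String × Int))) × (Int × Int)))
    (r : (List (List (String × Int))) × (Int × Int)) :
    Option ((List (List (String × Int))) × (Int × Int)) :=
  match b with
  | none => some r
  | some b' => if r.2.1 < b'.2.1 ∨ (r.2.1 = b'.2.1 ∧ r.2.2 > b'.2.2) then some r else b

-- B's selection rule on dp summaries
def obB (b : Option (Int × Int × Nat)) (x : Int × Int × Nat) : Option (Int × Int × Nat) :=
  match b with
  | none => some x
  | some bb => if x.1 < bb.1 ∨ (x.1 = bb.1 ∧ x.2.1 > bb.2.1) then some x else b

-- B's candidate at split point i (what pickB folds over)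
def candB (pref : List Int) (prev : List (Option (Int × Int × Nat))) (j i : Nat) :
    Option (Int × Int × Nat) :=
  (prev.getD i none).map fun sub =>
    (max sub.1 (segB pref j i), min sub.2.1 (segB pref j i), i)

def sumTakeV (lengths : List (String × Int)) (t : Nat) : Int :=
  ((lengths.take t).map (fun p => p.2)).sum

theorem pickB_eq (pref : List Int) (prev : List (Option (Int × Int × Nat))) (j : Nat)
    (b : Option (Int × Int × Nat)) (i : Nat) :
    pickB pref prev j b i =
      match candB pref prev j i with
      | none => b
      | some x => obB b x := by
  cases h : prev.getD i none with
  | none => simp only [pickB, candB, h]; rfl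
  | some sub => cases b <;> simp only [pickB, candB, obB, h, Option.map_some]

theorem foldl_pickB (pref : List Int) (prev : List (Option (Int × Int × Nat))) (j : Nat)
    (l : List Nat) : ∀ (b : Option (Int × Int × Nat)),
    l.foldl (pickB pref prev j) b = (l.filterMap (candB pref prev j)).foldl obB b := by
  induction l with
  | nil => intro b; rfl
  | cons i l ih =>
    intro b
    rw [List.foldl_cons, pickB_eq, List.filterMap_cons]
    cases h : candB pref prev j i <;> simp [ih]

theorem selStepA_some (bi : Int) (b r : (List (List (String × Int))) × (Int × Int)) (s : Int) :
    selStepA (bi, some b.2.1, b.2.2) (s, r) =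
      if r.2.1 < b.2.1 ∨ (r.2.1 = b.2.1 ∧ r.2.2 > b.2.2) then (s, some r.2.1, r.2.2)
      else (bi, some b.2.1, b.2.2) := by
  simp only [selStepA, Option.elim, Bool.or_eq_true, Bool.and_eq_true, decide_eq_true_eq,
    beq_iff_eq]

theorem selgo (rest : List ((List (List (String × Int))) × (Int × Int))) :
    ∀ (pre : List ((List (List (String × Int))) × (Int × Int)))
      (bi : Int) (b : (List (List (String × Int))) × (Int × Int)),
      0 ≤ bi → PySem.List.pyGet? (pre ++ rest) bi = some b →
      ∃ b' i', rest.foldl obA (some b) = some b' ∧ 0 ≤ i' ∧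
        (PySem.List.enumerate rest (pre.length : Int)).foldl selStepA (bi, some b.2.1, b.2.2)
          = (i', some b'.2.1, b'.2.2) ∧
        PySem.List.pyGet? (pre ++ rest) i' = some b' := by
  induction rest with
  | nil =>
    intro pre bi b hbi h
    exact ⟨b, bi, rfl, hbi, by simp [PySem.List.enumerate_nil], h⟩
  | cons r rest ih =>
    intro pre bi b hbi h
    have hassoc : pre ++ r :: rest = (pre ++ [r]) ++ rest := by simp
    have hlen : (((pre ++ [r]).length : Nat) : Int) = (pre.length : Int) + 1 := by
      simp
    rw [PySem.List.enumerate_cons, List.foldl_cons, List.foldl_cons, selStepA_some]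
    by_cases hc : r.2.1 < b.2.1 ∨ (r.2.1 = b.2.1 ∧ r.2.2 > b.2.2)
    · rw [if_pos hc]
      have hr : PySem.List.pyGet? ((pre ++ [r]) ++ rest) ((pre.length : Nat) : Int)
          = some r := by
        rw [← hassoc]
        exact PySem.List.pyGet?_append_length pre rest r
      obtain ⟨b', i', h1, h2, h3, h4⟩ :=
        ih (pre ++ [r]) ((pre.length : Nat) : Int) r (Int.natCast_nonneg _) hr
      refine ⟨b', i', ?_, h2, ?_, ?_⟩
      · rw [show obA (some b) r = some r by simp [obA, hc]]; exact h1
      · rw [show ((pre.length : Int) + 1) = (((pre ++ [r]).length : Nat) : Int) by rw [hlen]]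
        exact h3
      · rw [hassoc]; exact h4
    · rw [if_neg hc]
      obtain ⟨b', i', h1, h2, h3, h4⟩ :=
        ih (pre ++ [r]) bi b hbi (by rw [← hassoc]; exact h)
      refine ⟨b', i', ?_, h2, ?_, ?_⟩
      · rw [show obA (some b) r = some b by simp [obA, hc]]; exact h1
      · rw [show ((pre.length : Int) + 1) = (((pre ++ [r]).length : Nat) : Int) by rw [hlen]]
        exact h3
      · rw [hassoc]; exact h4

theorem pickBestA_eq (rs : List ((List (List (String × Int))) × (Int × Int))) :
    pickBestA rs = rs.foldl obA none := by
  cases rs with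
  | nil => rfl
  | cons r rest =>
    have hfirst : selStepA (-1, none, 0) (0, r) = (0, some r.2.1, r.2.2) := by
      simp [selStepA]
    obtain ⟨b', i', h1, h2, h3, h4⟩ :=
      selgo rest [r] 0 r (by omega) (by rw [List.singleton_append, PySem.List.pyGet?_zero_cons])
    unfold pickBestA
    rw [if_neg (by simp), PySem.List.enumerate_cons, List.foldl_cons, hfirst]
    have hlen1 : (([r] : List _).length : Int) = 1 := by simp
    rw [show ((0 : Int) + 1) = (([r] : List _).length : Int) by simp, h3]
    rw [if_neg (by simp; omega)]
    rw [show (r :: rest) = [r] ++ rest by simp, h4]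
    rw [List.singleton_append, List.foldl_cons, show obA none r = some r from rfl, h1]

theorem foldl_obA_map (g : Int × Int × Nat → (List (List (String × Int))) × (Int × Int))
    (hg : ∀ x, (g x).2 = (x.1, x.2.1)) (l : List (Int × Int × Nat)) :
    ∀ (acc : Option (Int × Int × Nat)),
      (l.map g).foldl obA (acc.map g) = (l.foldl obB acc).map g := by
  induction l with
  | nil => intro acc; rfl
  | cons x l ih =>
    intro acc
    rw [List.map_cons, List.foldl_cons, List.foldl_cons]
    have step : obA (acc.map g) (g x) = (obB acc x).map g := by
      cases acc with
      | none => rfl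
      | some a =>
        simp only [Option.map_some, obA, obB]
        by_cases hc : x.1 < a.1 ∨ (x.1 = a.1 ∧ x.2.1 > a.2.1)
        · rw [if_pos (show (g x).2.1 < (g a).2.1 ∨ ((g x).2.1 = (g a).2.1 ∧ (g x).2.2 > (g a).2.2)
              by simp only [hg]; exact hc), if_pos hc]
          rfl
        · rw [if_neg (show ¬((g x).2.1 < (g a).2.1 ∨ ((g x).2.1 = (g a).2.1 ∧ (g x).2.2 > (g a).2.2))
              by simp only [hg]; exact hc), if_neg hc]
          rfl
    rw [step, ih]

theorem filterMap_map_rel {ι : Type} (g : Int × Int × Nat → (List (List (String × Int))) × (Int × Int))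
    (f : ι → Option ((List (List (String × Int))) × (Int × Int)))
    (h : ι → Option (Int × Int × Nat)) :
    ∀ (l : List ι), (∀ k ∈ l, f k = (h k).map g) → l.filterMap f = (l.filterMap h).map g := by
  intro l
  induction l with
  | nil => intro _; rfl
  | cons k l ih =>
    intro hl
    rw [List.filterMap_cons, List.filterMap_cons, hl k (by simp)]
    cases hk : h k <;> simp [ih (fun k hk => hl k (by simp [hk]))]

theorem sumTakeV_succ (xs : List (String × Int)) (m : Nat) (h : m < xs.length) :
    sumTakeV xs (m+1) = sumTakeV xs m + xs[m].2 := by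
  unfold sumTakeV
  rw [List.take_add_one, List.getElem?_eq_getElem h, Option.toList_some, List.map_append,
    List.sum_append]
  simp

theorem prefB_eq (L : List (String × Int)) :
    prefB L = (List.range (L.length + 1)).map (sumTakeV L) := by
  induction L using List.reverseRecOn with
  | nil => simp [prefB, sumTakeV, List.range_succ]
  | append_singleton L p ih =>
    have hfold : prefB (L ++ [p]) = prefB L ++ [PySem.List.pyGetD (prefB L) (-1) 0 + p.2] := by
      simp [prefB, List.foldl_append]
    have hlast : PySem.List.pyGetD (prefB L) (-1) 0 = sumTakeV L L.length := by
      rw [ih, List.range_succ, List.map_append, List.map_singleton,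
        PySem.List.pyGetD_neg_one_append_singleton]
    rw [hfold, hlast, ih]
    have hmapcongr : (List.range (L.length + 1)).map (sumTakeV (L ++ [p]))
        = (List.range (L.length + 1)).map (sumTakeV L) := by
      apply List.map_congr_left
      intro t ht
      rw [List.mem_range] at ht
      unfold sumTakeV
      rw [List.take_append_of_le_length (by omega)]
    have hlast2 : sumTakeV (L ++ [p]) (L.length + 1) = sumTakeV L L.length + p.2 := by
      unfold sumTakeV
      rw [List.take_of_length_le (by simp), List.take_of_length_le (le_refl _)]
      simp
    have hl : (L ++ [p]).length = L.length + 1 := by simp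
    conv_rhs => rw [hl, List.range_succ, List.map_append, List.map_singleton]
    rw [hmapcongr, hlast2]

theorem prefB_getD (L : List (String × Int)) (i : Nat) (h : i ≤ L.length) :
    (prefB L).getD i 0 = sumTakeV L i := by
  rw [prefB_eq]
  exact PySem.List.getD_map_range _ _ _ _ (by omega)

theorem sumTakeV_sub (L : List (String × Int)) (j m : Nat) :
    sumTakeV L (j + m) = sumTakeV L j + (((L.drop j).take m).map (fun p => p.2)).sum := by
  unfold sumTakeV
  rw [List.take_add, List.map_append, List.sum_append]

theorem sumFirst (xs : List (String × Int)) (m : Nat) (hm : m ≤ xs.length) (c : Int) :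
    (PySem.List.pyRange 0 (m : Int)).foldl
        (fun s j => s + (PySem.List.pyGetD xs j ("", 0)).2) c
      = c + sumTakeV xs m := by
  induction m with
  | zero =>
    rw [PySem.List.pyRange_one_eq_nil (by omega)]
    simp [sumTakeV]
  | succ m ih =>
    have hcast : ((m + 1 : Nat) : Int) = (m : Int) + 1 := by omega
    rw [hcast, PySem.List.pyRange_one_succ_right (by omega), List.foldl_append,
      ih (by omega)]
    simp only [List.foldl_cons, List.foldl_nil, PySem.List.pyGetD_natCast]
    rw [List.getD_eq_getElem _ _ (by omega), sumTakeV_succ xs m (by omega)]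
    ring

theorem noneOfBig (k : Nat) (xs : List (String × Int)) (mx mn : Int)
    (h : xs.length < k) : splitA_rec k xs mx mn = none := by
  match k with
  | 0 => rfl
  | 1 =>
    have : xs.length = 0 := by omega
    simp [splitA_rec, this]
  | (t+2) =>
    by_cases h0 : xs.length = 0
    · simp [splitA_rec, h0]
    · have hr : PySem.List.pyRange 1 ((xs.length : Int) - ((t : Int) + 2) + 2) = [] :=
        PySem.List.pyRange_one_eq_nil (by push_cast; omega)
      simp only [splitA_rec, h0, if_false, hr, List.foldl_nil]
      rfl

theorem rowsB_eq (L : List (String × Int)) (pref : List Int) (mx mn : Int) :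
    ∀ (K : Nat), rowsB L pref mx mn K = (List.range K).map (fun s => rowVal L pref mx mn (s+1)) := by
  intro K
  induction K with
  | zero => rfl
  | succ t ih =>
    match t, ih with
    | 0, _ => simp [rowsB, rowVal, List.range_succ]
    | (s+1), ih =>
      show rowsB L pref mx mn (s+2) = _
      rw [rowsB, ih]
      have hlast : ((List.range (s+1)).map (fun s => rowVal L pref mx mn (s+1))).getLastD []
          = rowVal L pref mx mn (s+1) := by
        rw [List.range_succ, List.map_append, List.map_singleton, List.getLastD_concat]
      rw [hlast]
      conv_rhs => rw [List.range_succ, List.map_append, List.map_singleton]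
      rfl

theorem rebuildB_eq (L : List (String × Int)) (pref : List Int) (mx mn : Int) (K : Nat) :
    ∀ (t j : Nat), t ≤ K →
      rebuildB L (rowsB L pref mx mn K) t j = rebuildV L pref mx mn t j := by
  intro t
  induction t with
  | zero => intro j _; rfl
  | succ t ih =>
    intro j ht
    rw [rebuildB, rebuildV]
    have hget : (rowsB L pref mx mn K).getD t [] = rowVal L pref mx mn (t+1) := by
      rw [rowsB_eq]
      exact PySem.List.getD_map_range _ _ _ _ (by omega)
    rw [hget]
    cases (rowVal L pref mx mn (t+1)).getD j none with
    | none => rfl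
    | some e => simp only [ih _ (by omega)]


theorem splitA_rec_one (lengths : List (String × Int)) (mx mn : Int)
    (h : lengths.length ≠ 0) :
    splitA_rec 1 lengths mx mn
      = some ([lengths],
          (max mx ((lengths.length : Int) - 1 + ((lengths.map (fun p => p.2)).sum)),
           min mn ((lengths.length : Int) - 1 + ((lengths.map (fun p => p.2)).sum)))) := by
  simp only [splitA_rec, h, if_false, PySem.List.foldl_add]
  rw [show (List.map Prod.snd lengths).sum
      = (List.map (fun p : String × Int => p.2) lengths).sum from rfl]
  simp only [Option.some.injEq, Prod.mk.injEq]
  refine ⟨trivial, ?_, ?_⟩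
  · simp only [max_def]; split_ifs <;> omega
  · simp only [min_def]; split_ifs <;> omega

theorem splitA_rec_two (t : Nat) (lengths : List (String × Int)) (mx mn : Int)
    (h : lengths.length ≠ 0) :
    splitA_rec (t+2) lengths mx mn
      = pickBestA ((PySem.List.pyRange 1 ((lengths.length : Int) - ((t : Int) + 2) + 2)).filterMap
          (fun i => (splitA_rec (t+1) (PySem.List.slice lengths (some i) none) mx mn).map
            (fun result =>
              let first_line_len :=
                (PySem.List.pyRange 0 i).foldl
                  (fun s j => s + (PySem.List.pyGetD lengths j ("", 0)).2) (i - 1)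
              let result := if result.2.1 < first_line_len then (result.1, (first_line_len, result.2.2)) else result
              let result := if result.2.2 > first_line_len then (result.1, (result.2.1, first_line_len)) else result
              (PySem.List.slice lengths none (some i) :: result.1, result.2)))) := by
  simp only [splitA_rec, h, if_false]
  refine congrArg pickBestA ?_
  generalize PySem.List.pyRange 1 ((lengths.length : Int) - ((t : Int) + 2) + 2) = l
  induction l using List.reverseRecOn with
  | nil => rfl
  | append_singleton l a ihl =>
    rw [List.foldl_append, List.filterMap_append, ihl]
    cases hFa : splitA_rec (t + 1) (PySem.List.slice lengths (some a) none) mx mn <;>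
      simp [hFa]

theorem rowVal_one_getD (L : List (String × Int)) (mx mn : Int) (j : Nat) (hj : j ≤ L.length) :
    (rowVal L (prefB L) mx mn 1).getD j none
      = if j < L.length then
          some (max mx (segB (prefB L) j L.length), min mn (segB (prefB L) j L.length), L.length)
        else none := by
  show (row1B L (prefB L) mx mn).getD j none = _
  unfold row1B
  exact PySem.List.getD_map_range _ _ _ _ (by omega)

theorem segB_drop (L : List (String × Int)) (j : Nat) (hj : j ≤ L.length) :
    segB (prefB L) j L.length
      = ((L.drop j).length : Int) - 1 + ((L.drop j).map (fun p => p.2)).sum := by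
  unfold segB
  rw [prefB_getD _ _ (le_refl _), prefB_getD _ _ hj]
  have h1 : sumTakeV L L.length = sumTakeV L j + ((L.drop j).map (fun p => p.2)).sum := by
    have h2 := sumTakeV_sub L j (L.length - j)
    rw [show j + (L.length - j) = L.length by omega] at h2
    rw [h2, List.take_of_length_le (by simp [List.length_drop])]
  rw [h1, List.length_drop, Nat.cast_sub hj]
  ring

theorem segB_mid (L : List (String × Int)) (j m : Nat) (hjm : j + m ≤ L.length) :
    segB (prefB L) j (j + m)
      = ((m : Int) - 1) + sumTakeV (L.drop j) m := by
  unfold segB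
  rw [prefB_getD _ _ hjm, prefB_getD _ _ (by omega), sumTakeV_sub L j m]
  show _ = (m : Int) - 1 + ((List.take m (List.drop j L)).map (fun p => p.2)).sum
  push_cast
  ring

theorem candEq (L : List (String × Int)) (mx mn : Int) (t j : Nat) (hj : j < L.length)
    (ih : ∀ j', j' ≤ L.length →
      splitA_rec (t+1) (L.drop j') mx mn
        = ((rowVal L (prefB L) mx mn (t+1)).getD j' none).map
            (fun e => (rebuildV L (prefB L) mx mn (t+1) j', (e.1, e.2.1)))) :
    ∀ k : Nat, k < (L.length + 2 - (t+2)) - (j+1) →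
      ((fun i : Int => (splitA_rec (t+1) (PySem.List.slice (L.drop j) (some i) none) mx mn).map
          (fun result =>
            let first_line_len :=
              (PySem.List.pyRange 0 i).foldl
                (fun s jj => s + (PySem.List.pyGetD (L.drop j) jj ("", 0)).2) (i - 1)
            let result := if result.2.1 < first_line_len then (result.1, (first_line_len, result.2.2)) else result
            let result := if result.2.2 > first_line_len then (result.1, (result.2.1, first_line_len)) else result
            (PySem.List.slice (L.drop j) none (some i) :: result.1, result.2))) (1 + (k : Int)))
      = (candB (prefB L) (rowVal L (prefB L) mx mn (t+1)) j (j+1+k)).map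
          (fun x => (PySem.List.slice L (some (j : Int)) (some (x.2.2 : Int)) ::
              rebuildV L (prefB L) mx mn (t+1) x.2.2, (x.1, x.2.1))) := by
  intro k hk
  have hi : (1 + (k : Int)) = ((k + 1 : Nat) : Int) := by omega
  have hbound : j + (k + 1) ≤ L.length := by omega
  have hidx : j + 1 + k = j + (k + 1) := by omega
  simp only [hi]
  rw [PySem.List.slice_from_natCast, List.drop_drop, ih (j + (k+1)) hbound]
  have hfll : (PySem.List.pyRange 0 ((k + 1 : Nat) : Int)).foldl
      (fun s jj => s + (PySem.List.pyGetD (L.drop j) jj ("", 0)).2) (((k + 1 : Nat) : Int) - 1)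
      = segB (prefB L) j (j + (k + 1)) := by
    rw [sumFirst (L.drop j) (k+1) (by simp [List.length_drop]; omega),
      segB_mid L j (k+1) hbound]
  unfold candB
  rw [hidx]
  cases hE2 : (rowVal L (prefB L) mx mn (t+1)).getD (j + (k+1)) none with
  | none => rfl
  | some e =>
    simp only [Option.map_some]
    rw [hfll]
    have hslice : PySem.List.slice (L.drop j) none (some ((k + 1 : Nat) : Int))
        = PySem.List.slice L (some (j : Int)) (some ((j + (k + 1) : Nat) : Int)) := by
      rw [PySem.List.slice_to_natCast, PySem.List.slice_natCast,
        show j + (k + 1) - j = k + 1 by omega]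
    rw [hslice]
    set fl := segB (prefB L) j (j + (k + 1)) with hfl
    simp only [Option.some.injEq]
    by_cases h1 : e.1 < fl <;> by_cases h2 : e.2.1 > fl <;>
      simp only [h1, h2, if_pos, if_false] <;>
      refine Prod.ext rfl (Prod.ext ?_ ?_) <;>
      simp only [max_def, min_def] <;> split_ifs <;> simp_all <;> omega

theorem mainLemma (L : List (String × Int)) (mx mn : Int) :
    ∀ (t j : Nat), j ≤ L.length →
      splitA_rec (t+1) (L.drop j) mx mn
        = ((rowVal L (prefB L) mx mn (t+1)).getD j none).map
            (fun e => (rebuildV L (prefB L) mx mn (t+1) j, (e.1, e.2.1))) := by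
  intro t
  induction t with
  | zero =>
    intro j hj
    by_cases hjn : j < L.length
    · rw [rowVal_one_getD L mx mn j hj, if_pos hjn]
      have hlen : (L.drop j).length ≠ 0 := by simp [List.length_drop]; omega
      rw [show (0+1 : Nat) = 1 from rfl, splitA_rec_one _ _ _ hlen]
      have hreb : rebuildV L (prefB L) mx mn 1 j = [L.drop j] := by
        show rebuildV L (prefB L) mx mn (0+1) j = _
        unfold rebuildV
        rw [rowVal_one_getD L mx mn j hj, if_pos hjn]
        simp only []
        rw [PySem.List.slice_natCast]
        rw [List.take_of_length_le (by simp [List.length_drop])]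
        rfl
      rw [segB_drop L j hj, hreb]
      simp
    · have hje : j = L.length := by omega
      rw [rowVal_one_getD L mx mn j hj, if_neg hjn, hje, List.drop_length]
      rfl
  | succ t ih =>
    intro j hj
    have h21 : t + 1 + 1 = t + 2 := rfl
    by_cases hjn : j < L.length
    · have hlen0 : (L.drop j).length ≠ 0 := by simp [List.length_drop]; omega
      rw [h21, splitA_rec_two t (L.drop j) mx mn hlen0]
      have hq : ((((L.drop j).length : Int) - ((t : Int) + 2) + 2) - 1).toNat
          = (L.length + 2 - (t+2)) - (j+1) := by
        rw [List.length_drop, Nat.cast_sub hj]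
        omega
      rw [PySem.List.pyRange_one, List.filterMap_map, hq]
      have hres : List.filterMap
          ((fun i : Int => (splitA_rec (t+1) (PySem.List.slice (L.drop j) (some i) none) mx mn).map
            (fun result =>
              let first_line_len :=
                (PySem.List.pyRange 0 i).foldl
                  (fun s jj => s + (PySem.List.pyGetD (L.drop j) jj ("", 0)).2) (i - 1)
              let result := if result.2.1 < first_line_len then (result.1, (first_line_len, result.2.2)) else result
              let result := if result.2.2 > first_line_len then (result.1, (result.2.1, first_line_len)) else result
              (PySem.List.slice (L.drop j) none (some i) :: result.1, result.2))) ∘ (fun k : Nat => 1 + (k : Int)))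
          (List.range ((L.length + 2 - (t+2)) - (j+1)))
          = (List.filterMap (fun k => candB (prefB L) (rowVal L (prefB L) mx mn (t+1)) j (j+1+k))
              (List.range ((L.length + 2 - (t+2)) - (j+1)))).map
              (fun x => (PySem.List.slice L (some (j : Int)) (some (x.2.2 : Int)) ::
                rebuildV L (prefB L) mx mn (t+1) x.2.2, (x.1, x.2.1))) := by
        refine filterMap_map_rel _ _ _ (List.range ((L.length + 2 - (t+2)) - (j+1))) ?_
        intro k hk
        rw [List.mem_range] at hk
        exact candEq L mx mn t j hjn ih k hk
      rw [hres, pickBestA_eq]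
      have hfold := foldl_obA_map
        (fun x => (PySem.List.slice L (some (j : Int)) (some (x.2.2 : Int)) ::
          rebuildV L (prefB L) mx mn (t+1) x.2.2, (x.1, x.2.1)))
        (fun x => rfl)
        (List.filterMap (fun k => candB (prefB L) (rowVal L (prefB L) mx mn (t+1)) j (j+1+k))
          (List.range ((L.length + 2 - (t+2)) - (j+1)))) none
      rw [Option.map_none] at hfold
      rw [hfold]
      have hentry : (rowVal L (prefB L) mx mn (t+2)).getD j none
          = (List.filterMap (fun k => candB (prefB L) (rowVal L (prefB L) mx mn (t+1)) j (j+1+k))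
              (List.range ((L.length + 2 - (t+2)) - (j+1)))).foldl obB none := by
        show (stepB L (prefB L) (rowVal L (prefB L) mx mn (t+1)) (t+2)).getD j none = _
        unfold stepB
        rw [PySem.List.getD_map_range _ _ _ _ (by omega), foldl_pickB,
          List.range'_eq_map_range, List.filterMap_map]
        rfl
      rw [hentry]
      cases hE : (List.filterMap (fun k => candB (prefB L) (rowVal L (prefB L) mx mn (t+1)) j (j+1+k))
          (List.range ((L.length + 2 - (t+2)) - (j+1)))).foldl obB none with
      | none => rfl
      | some e =>
        simp only [Option.map_some]
        have hreb : rebuildV L (prefB L) mx mn (t+2) j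
            = PySem.List.slice L (some (j : Int)) (some (e.2.2 : Int)) ::
              rebuildV L (prefB L) mx mn (t+1) e.2.2 := by
          show rebuildV L (prefB L) mx mn (t+1+1) j = _
          unfold rebuildV
          rw [h21, hentry, hE]
          rfl
        rw [hreb]
    · have hje : j = L.length := by omega
      have hdrop : L.drop j = [] := by rw [hje]; exact List.drop_length
      rw [hdrop, noneOfBig (t+1+1) [] mx mn (by simp)]
      have hentry : (rowVal L (prefB L) mx mn (t+1+1)).getD j none = none := by
        show (stepB L (prefB L) (rowVal L (prefB L) mx mn (t+1)) (t+2)).getD j none = none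
        unfold stepB
        rw [PySem.List.getD_map_range _ _ _ _ (by omega),
          show (L.length + 2 - (t+2)) - (j+1) = 0 by omega]
        rfl
      rw [hentry]
      rfl

-- ===== VERDICT (by name: the statement is the Claim_ definition above) =====
theorem split_text_ex_spec : Claim_equal_split_text_ex := by
  intro L lc mx mn _hdom hpre
  unfold Pre_split_text_ex at hpre
  unfold Spec_split_text_ex split_text_ex split_text_ex_alt
  rw [if_neg (by omega), if_neg (by omega)]
  by_cases h0 : L.length = 0 ∨ (L.length : Int) < lc
  · rw [if_pos h0]
    rcases h0 with h0 | h0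
    · exact noneOfBig _ _ _ _ (by omega)
    · exact noneOfBig _ _ _ _ (by omega)
  · rw [if_neg h0]
    push_neg at h0
    obtain ⟨t, ht⟩ : ∃ t, lc.toNat = t + 1 := ⟨lc.toNat - 1, by omega⟩
    have hmain := mainLemma L mx mn t 0 (by omega)
    rw [List.drop_zero] at hmain
    have hrows : (rowsB L (prefB L) mx mn (t+1)).getLastD [] = rowVal L (prefB L) mx mn (t+1) := by
      rw [rowsB_eq, List.range_succ, List.map_append, List.map_singleton, List.getLastD_concat]
    rw [ht, hmain]
    show _ = (match ((rowsB L (prefB L) mx mn (t+1)).getLastD []).getD 0 none with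
      | none => none
      | some e => some (rebuildB L (rowsB L (prefB L) mx mn (t+1)) (t+1) 0, (e.1, e.2.1)))
    rw [hrows]
    cases hE : (rowVal L (prefB L) mx mn (t+1)).getD 0 none with
    | none => rfl
    | some e =>
      simp only [Option.map_some]
      rw [rebuildB_eq L (prefB L) mx mn (t+1) (t+1) 0 (le_refl _)]
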